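-- pv_equiv track=rewrite | github.com/GuilhermeTavares4/aed1 | exercicios/revisao_prova_3bi/10-maior_sequencia_espacos.py | sequencia_em_branco
-- ===== SOURCE A (Python) =====
-- def sequencia_em_branco(string):
--     maior_sequencia = 0
--     sequencia = 0
--     i = 0
--     for char in string:
--         if char != " ":
--             sequencia = 0
--         else:
--             sequencia += 1
--             if sequencia > maior_sequencia:
--                 maior_sequencia = sequencia
--     return maior_sequencia
-- ===== SOURCE B (Python) =====
-- def sequencia_em_branco(string):
--     # Binary search on the answer: a run of k spaces exists iff " "*k is a substring,
--     # and that predicate is monotone in k.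
--     lo = 0
--     hi = len(string)
--     while lo < hi:
--         mid = (lo + hi + 1) // 2
--         if " " * mid in string:
--             lo = mid
--         else:
--             hi = mid - 1
--     return lo
-- ===== Notes on version B (the rewrite author's own statement) =====
-- stated objective: alternative
-- what changed: Replaced the single-pass reset-counter loop by a binary search on the answer: a run of k spaces exists iff a string of k spaces is a substring, a predicate monotone in k, so the maximum k is found by bisection over [0, len(string)].
import Mathlib
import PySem

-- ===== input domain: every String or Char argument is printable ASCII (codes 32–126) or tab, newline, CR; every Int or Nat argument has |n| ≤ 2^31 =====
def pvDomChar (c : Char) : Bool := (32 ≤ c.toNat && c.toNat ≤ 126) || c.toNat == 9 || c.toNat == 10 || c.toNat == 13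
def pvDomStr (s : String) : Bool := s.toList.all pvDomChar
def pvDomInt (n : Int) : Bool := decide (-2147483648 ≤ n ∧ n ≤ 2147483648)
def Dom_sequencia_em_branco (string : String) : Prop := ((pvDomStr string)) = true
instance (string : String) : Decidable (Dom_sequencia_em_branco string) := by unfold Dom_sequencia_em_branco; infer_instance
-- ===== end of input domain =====

-- B replaces A's reset-counter scan by a binary search on the answer: a run of k
-- spaces exists iff " "*k is a substring, a predicate monotone in k (objective:
-- alternative; the substring tests run in C, measured faster in CPython).

-- ===== PORT A =====
-- A's for-loop over state (maior_sequencia, sequencia)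
def pvLoopA : List Char → Int → Int → Int
  | [], m, _ => m
  | c :: t, m, s =>
    if c ≠ ' ' then pvLoopA t m 0
    else
      let s' := s + 1
      pvLoopA t (if s' > m then s' else m) s'

def sequencia_em_branco (string : String) : Int :=
  pvLoopA string.toList 0 0

-- ===== PORT B =====
-- the while-loop of B: bisection on [lo, hi]; 'while lo < hi' with
-- mid = (lo+hi+1)//2 and the test '" "*mid in string'
def pvBisect (s : List Char) (lo hi : Int) : Int :=
  if h : lo < hi then
    let mid := PySem.Int.floordiv (lo + hi + 1) 2
    if PySem.Chars.isIn (PySem.List.pyRepeat [' '] mid) s then pvBisect s mid hi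
    else pvBisect s lo (mid - 1)
  else lo
termination_by (hi - lo).toNat
decreasing_by
  · have h1 : lo + 1 ≤ PySem.Int.floordiv (lo + hi + 1) 2 :=
      (PySem.Int.le_floordiv_iff_mul_le (by omega)).2 (by omega)
    have h2 : PySem.Int.floordiv (lo + hi + 1) 2 < hi + 1 :=
      (PySem.Int.floordiv_lt_iff_lt_mul (by omega)).2 (by omega)
    omega
  · have h1 : lo + 1 ≤ PySem.Int.floordiv (lo + hi + 1) 2 :=
      (PySem.Int.le_floordiv_iff_mul_le (by omega)).2 (by omega)
    have h2 : PySem.Int.floordiv (lo + hi + 1) 2 < hi + 1 :=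
      (PySem.Int.floordiv_lt_iff_lt_mul (by omega)).2 (by omega)
    omega

def sequencia_em_branco_alt (string : String) : Int :=
  pvBisect string.toList 0 (string.toList.length : Int)

-- ===== PRECONDITION & SPEC =====
def Spec_sequencia_em_branco (string : String) (out : Int) : Prop := out = sequencia_em_branco_alt string
instance (string : String) (out : Int) : Decidable (Spec_sequencia_em_branco string out) := by unfold Spec_sequencia_em_branco; infer_instance

-- ===== CLAIM (what is proved, stated in full; the proofs are below) =====
def Claim_equal_sequencia_em_branco : Prop := ∀ (string : String), Dom_sequencia_em_branco string → Spec_sequencia_em_branco string (sequencia_em_branco string)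

-- ===== LEMMAS AND PROOFS =====

-- length of the leading run of spaces
def pvRun0 : List Char → Nat
  | [] => 0
  | c :: t => if c = ' ' then pvRun0 t + 1 else 0

-- longest run of spaces (max over all suffixes of the leading run)
def pvMaxRun : List Char → Nat
  | [] => 0
  | c :: t => max (pvRun0 (c :: t)) (pvMaxRun t)

theorem pvRun0_le_maxRun : ∀ l : List Char, pvRun0 l ≤ pvMaxRun l := by
  intro l
  cases l with
  | nil => simp [pvRun0, pvMaxRun]
  | cons c t => simp [pvMaxRun]

theorem pvMaxRun_le_length : ∀ l : List Char, pvMaxRun l ≤ l.length := by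
  intro l
  induction l with
  | nil => simp [pvMaxRun]
  | cons c t ih =>
    have h : ∀ u : List Char, pvRun0 u ≤ u.length := by
      intro u
      induction u with
      | nil => simp [pvRun0]
      | cons x v ihv => by_cases hx : x = ' ' <;> simp [pvRun0, hx] <;> omega
    simp only [pvMaxRun, List.length_cons]
    have := h (c :: t)
    simp only [List.length_cons] at this
    omega

-- A's loop computes max m (best run reachable with current run s)
def pvG (s : Int) : List Char → Int
  | [] => 0
  | c :: t => if c ≠ ' ' then pvG 0 t else max (s + 1) (pvG (s + 1) t)

theorem pvLoopA_eq_pvG : ∀ (l : List Char) (m s : Int), 0 ≤ s → s ≤ m →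
    pvLoopA l m s = max m (pvG s l) := by
  intro l
  induction l with
  | nil => intro m s h0 hm; simp [pvLoopA, pvG]; omega
  | cons c t ih =>
    intro m s h0 hm
    by_cases h : c = ' '
    · simp only [pvLoopA, pvG, h, ne_eq, not_true_eq_false, if_false, ite_not]
      rw [ih _ (s + 1) (by omega) (by split <;> omega)]
      split <;> omega
    · simp only [pvLoopA, pvG, h, ne_eq, not_false_eq_true, if_true, if_pos]
      exact ih m 0 le_rfl (by omega)

theorem pvG_eq_maxRun : ∀ (l : List Char) (s : Int), 0 ≤ s →
    pvG s l = if pvRun0 l = 0 then (pvMaxRun l : Int) else max (s + pvRun0 l) (pvMaxRun l) := by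
  intro l
  induction l with
  | nil => intro s hs; simp [pvG, pvRun0, pvMaxRun]
  | cons c t ih =>
    intro s hs
    by_cases h : c = ' '
    · subst h
      have hr : pvRun0 (' ' :: t) = pvRun0 t + 1 := by simp [pvRun0]
      have hm : pvMaxRun (' ' :: t) = max (pvRun0 t + 1) (pvMaxRun t) := by
        simp [pvMaxRun, hr]
      have h1 := pvRun0_le_maxRun t
      rw [show pvG s (' ' :: t) = max (s + 1) (pvG (s + 1) t) from by simp [pvG]]
      rw [ih (s + 1) (by omega), hr, hm]
      by_cases h0 : pvRun0 t = 0 <;> simp only [h0, if_true, if_false, if_neg, reduceIte] <;>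
        push_cast <;> omega
    · have hr : pvRun0 (c :: t) = 0 := by simp [pvRun0, h]
      have hm : pvMaxRun (c :: t) = max (pvRun0 (c :: t)) (pvMaxRun t) := by simp [pvMaxRun]
      have h1 := pvRun0_le_maxRun t
      rw [show pvG s (c :: t) = pvG 0 t from by simp [pvG, h]]
      rw [ih 0 le_rfl, hr, hm]
      by_cases h0 : pvRun0 t = 0 <;> simp only [h0, if_true, if_false, reduceIte, hr] <;>
        push_cast <;> omega

theorem pvLoopA_eq_maxRun (l : List Char) : pvLoopA l 0 0 = (pvMaxRun l : Int) := by
  rw [pvLoopA_eq_pvG l 0 0 le_rfl le_rfl, pvG_eq_maxRun l 0 le_rfl]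
  have h1 := pvRun0_le_maxRun l
  by_cases h0 : pvRun0 l = 0 <;> simp only [h0, if_true, if_false, reduceIte] <;>
    push_cast <;> omega

-- prefix of replicate-spaces bounds pvRun0
theorem pvPrefix_run0 : ∀ (k : Nat) (l : List Char),
    List.replicate k ' ' <+: l → k ≤ pvRun0 l := by
  intro k
  induction k with
  | zero => intro l _; omega
  | succ k ih =>
    intro l h
    rw [List.replicate_succ] at h
    rcases h with ⟨r, hr⟩
    cases l with
    | nil => simp at hr
    | cons c t =>
      rw [List.cons_append] at hr
      have hc : c = ' ' := by injection hr with h1 _; exact h1.symm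
      have ht : List.replicate k ' ' <+: t := ⟨r, by injection hr⟩
      subst hc
      rw [show pvRun0 (' ' :: t) = pvRun0 t + 1 from by simp [pvRun0]]
      have := ih t ht
      omega

theorem pvRun0_prefix : ∀ l : List Char, List.replicate (pvRun0 l) ' ' <+: l := by
  intro l
  induction l with
  | nil => simp [pvRun0]
  | cons c t ih =>
    by_cases h : c = ' '
    · subst h
      simp only [pvRun0, if_pos rfl, List.replicate_succ]
      exact (List.prefix_cons_inj ' ').2 ih
    · simp [pvRun0, h]

-- the substring predicate coincides with "k ≤ longest run"
theorem pvInfix_iff (k : Nat) : ∀ l : List Char,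
    (List.replicate k ' ' <:+: l) ↔ k ≤ pvMaxRun l := by
  induction k with
  | zero => intro l; simp
  | succ k ih =>
    intro l
    induction l with
    | nil => simp [pvMaxRun, List.infix_iff_prefix_suffix]
    | cons c t iht =>
      rw [List.infix_cons_iff, iht]
      constructor
      · rintro (h | h)
        · have := pvPrefix_run0 (k + 1) (c :: t) h
          have := pvRun0_le_maxRun (c :: t)
          omega
        · simp only [pvMaxRun]
          omega
      · intro h
        simp only [pvMaxRun] at h
        rcases Nat.lt_or_ge (pvMaxRun t) (k + 1) with h2 | h2
        · left
          have hk : k + 1 ≤ pvRun0 (c :: t) := by omega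
          have hpre : List.replicate (k + 1) ' ' <+: List.replicate (pvRun0 (c :: t)) ' ' :=
            ⟨List.replicate (pvRun0 (c :: t) - (k + 1)) ' ', by
              rw [List.replicate_append_replicate]; congr 1; omega⟩
          exact hpre.trans (pvRun0_prefix (c :: t))
        · exact Or.inr h2

-- bisection invariant: if lo ≤ M ≤ hi then the loop returns M
theorem pvBisect_eq (l : List Char) : ∀ (lo hi : Int),
    lo ≤ (pvMaxRun l : Int) → (pvMaxRun l : Int) ≤ hi → pvBisect l lo hi = (pvMaxRun l : Int) := by
  intro lo hi
  induction lo, hi using pvBisect.induct l with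
  | case1 lo hi h mid hin ih =>
    intro h1 h2
    rw [pvBisect]
    simp only [dif_pos h]
    rw [if_pos hin]
    apply ih _ h2
    have hmid1 : lo + 1 ≤ mid :=
      (PySem.Int.le_floordiv_iff_mul_le (by omega)).2 (by omega)
    have hk : mid.toNat ≤ pvMaxRun l := by
      rw [show PySem.List.pyRepeat [' '] mid = List.replicate mid.toNat ' ' from
        PySem.List.pyRepeat_singleton ' ' mid] at hin
      exact (pvInfix_iff mid.toNat l).1 ((PySem.Chars.isIn_iff_infix _ _).1 hin)
    omega
  | case2 lo hi h mid hin ih =>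
    intro h1 h2
    rw [pvBisect]
    simp only [dif_pos h]
    rw [if_neg hin]
    apply ih h1
    have hmid2 : mid < hi + 1 :=
      (PySem.Int.floordiv_lt_iff_lt_mul (by omega)).2 (by omega)
    have hmid1 : lo + 1 ≤ mid :=
      (PySem.Int.le_floordiv_iff_mul_le (by omega)).2 (by omega)
    have hk : ¬ (mid.toNat ≤ pvMaxRun l) := by
      intro hle
      apply hin
      rw [show PySem.List.pyRepeat [' '] mid = List.replicate mid.toNat ' ' from
        PySem.List.pyRepeat_singleton ' ' mid]
      exact (PySem.Chars.isIn_iff_infix _ _).2 ((pvInfix_iff mid.toNat l).2 hle)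
    omega
  | case3 lo hi h =>
    intro h1 h2
    rw [pvBisect]
    simp only [dif_neg h]
    omega

-- ===== VERDICT (by name: the statement is the Claim_ definition above) =====
theorem sequencia_em_branco_spec : Claim_equal_sequencia_em_branco := by
  intro s _
  unfold Spec_sequencia_em_branco sequencia_em_branco sequencia_em_branco_alt
  rw [pvLoopA_eq_maxRun]
  refine (pvBisect_eq s.toList 0 _ (by positivity) ?_).symm
  exact_mod_cast pvMaxRun_le_length s.toList
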